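-- pv_equiv track=rewrite | github.com/Miguelin04/APE2-_AUTOMATAS | backend/automatas.py | analizar_crecimiento
-- ===== SOURCE A (Python) =====
-- def kleene_star(l: list[str], max_iter: int) -> list[str]:
--     resultado = [""]
--     actual = [""]
--     for i in range(1, max_iter + 1):
--         nuevo = []
--         for x in actual:
--             for y in l:
--                 cadena = x + y
--                 nuevo.append(cadena)
--         for elemento in nuevo:
--             if elemento not in resultado:
--                 resultado.append(elemento)
--         actual = nuevo
--     return resultado
--
-- def analizar_crecimiento(l: list[str]) -> list[dict]:
--     # Retornará una lista de diccionarios para poder consumirlo en JS/Frontend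
--     datos = []
--     for i in range(1, 6):
--         resultado = kleene_star(l, i)
--         # Pseudocódigo dice imprimir, nosotros retornaremos datos estructurados
--         # IMPRIMIR "Iteración:", i | IMPRIMIR "Cantidad:", tamaño(resultado)
--         datos.append({
--             "iteracion": i,
--             "cantidad": len(resultado)
--         })
--     return datos
-- ===== SOURCE B (Python) =====
-- def analizar_crecimiento(l: list[str]) -> list[dict]:
--     # One forward pass over sets: reuse each level's set of strings instead of
--     # rebuilding the whole Kleene closure from scratch for every i.
--     datos = []
--     resultado = {""}
--     actual = {""}
--     for i in range(1, 6):
--         nuevo = {x + y for x in actual for y in l}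
--         resultado |= nuevo
--         datos.append({"iteracion": i, "cantidad": len(resultado)})
--         actual = nuevo
--     return datos
-- ===== Notes on version B (the rewrite author's own statement) =====
-- stated objective: alternative
-- what changed: B replaces the per-i recomputation of kleene_star (rebuilding all concatenation levels from scratch for each i=1..5, with list-membership dedup) by a single forward pass that keeps a set of seen strings and the set of current-level strings, extending one level per step and recording each count.
import Mathlib
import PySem

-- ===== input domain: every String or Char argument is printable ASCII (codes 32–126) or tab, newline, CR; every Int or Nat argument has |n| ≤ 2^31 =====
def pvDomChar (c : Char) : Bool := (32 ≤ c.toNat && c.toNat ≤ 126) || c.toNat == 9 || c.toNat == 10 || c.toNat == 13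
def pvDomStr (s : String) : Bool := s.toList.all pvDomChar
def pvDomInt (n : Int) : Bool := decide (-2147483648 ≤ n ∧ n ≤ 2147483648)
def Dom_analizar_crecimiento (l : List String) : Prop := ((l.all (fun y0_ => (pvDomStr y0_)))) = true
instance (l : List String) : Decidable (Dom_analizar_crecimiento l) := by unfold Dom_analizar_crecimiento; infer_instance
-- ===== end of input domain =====

-- B merges the two functions into one forward pass over sets, reusing each level
-- instead of recomputing kleene_star from scratch for every i (objective: alternative).

-- ===== PORT A =====
-- one iteration of kleene_star's outer loop (the body does not use the loop index)
def pvStepA (l : List String) (st : List String × List String) : List String × List String :=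
  let nuevo := st.2.foldl (fun nv x => l.foldl (fun nv2 y => nv2 ++ [x ++ y]) nv) []
  let resultado := nuevo.foldl (fun r e => if e ∈ r then r else r ++ [e]) st.1
  (resultado, nuevo)

def kleene_star (l : List String) (max_iter : Int) : List String :=
  ((PySem.List.pyRange 1 (max_iter + 1) 1).foldl
    (fun st _ => pvStepA l st) (([""] : List String), ([""] : List String))).1

def analizar_crecimiento (l : List String) : List (List (String × Int)) :=
  (PySem.List.pyRange 1 6 1).foldl
    (fun datos i =>
      let resultado := kleene_star l i
      datos ++ [[("iteracion", i), ("cantidad", (resultado.length : Int))]])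
    []

-- ===== PORT B =====
-- one iteration of B's single loop: nuevo = {x + y …}; resultado |= nuevo; actual = nuevo
def pvStepB (l : List String) (st : PySem.Set String × PySem.Set String) :
    PySem.Set String × PySem.Set String :=
  let nuevo := PySem.Set.ofList
    (st.2.foldl (fun acc x => l.foldl (fun a y => a ++ [x ++ y]) acc) [])
  (PySem.Set.union st.1 nuevo, nuevo)

def analizar_crecimiento_alt (l : List String) : List (List (String × Int)) :=
  ((PySem.List.pyRange 1 6 1).foldl
    (fun (st : List (List (String × Int)) × PySem.Set String × PySem.Set String) i =>
      let s' := pvStepB l st.2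
      (st.1 ++ [[("iteracion", i), ("cantidad", PySem.Set.len s'.1)]], s'))
    ([], PySem.Set.ofList [""], PySem.Set.ofList [""])).1

-- ===== PRECONDITION & SPEC =====
def Spec_analizar_crecimiento (l : List String) (out : List (List (String × Int))) : Prop := out = analizar_crecimiento_alt l
instance (l : List String) (out : List (List (String × Int))) : Decidable (Spec_analizar_crecimiento l out) := by unfold Spec_analizar_crecimiento; infer_instance

-- ===== CLAIM (what is proved, stated in full; the proofs are below) =====
def Claim_equal_analizar_crecimiento : Prop := ∀ (l : List String), Dom_analizar_crecimiento l → Spec_analizar_crecimiento l (analizar_crecimiento l)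

-- ===== LEMMAS AND PROOFS =====

-- invariant tying A's (resultado, actual) lists to B's (resultado, actual) sets
def pvInv (a : List String × List String) (b : PySem.Set String × PySem.Set String) : Prop :=
  a.1.Nodup ∧ b.1.Nodup ∧ b.2.Nodup ∧
  (∀ z, z ∈ a.1 ↔ z ∈ b.1) ∧ (∀ z, z ∈ a.2 ↔ z ∈ b.2)

theorem pvProd_mem (l act : List String) (z : String) :
    z ∈ act.foldl (fun nv x => l.foldl (fun nv2 y => nv2 ++ [x ++ y]) nv) [] ↔
      ∃ x ∈ act, ∃ y ∈ l, z = x ++ y := by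
  have h : ∀ (acc : List String),
      act.foldl (fun nv x => l.foldl (fun nv2 y => nv2 ++ [x ++ y]) nv) acc
        = acc ++ act.flatMap (fun x => l.map (fun y => x ++ y)) := by
    intro acc
    have inner : ∀ (x : String) (nv : List String),
        l.foldl (fun nv2 y => nv2 ++ [x ++ y]) nv = nv ++ l.map (fun y => x ++ y) := by
      intro x nv
      rw [PySem.List.foldl_append_eq_flatMap (fun y => [x ++ y]) l nv]
      congr 1
      induction l with
      | nil => rfl
      | cons a t ih => simp [List.flatMap_cons, ih]
    simp only [inner]
    exact PySem.List.foldl_append_eq_flatMap (fun x => l.map (fun y => x ++ y)) act acc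
  rw [h]
  simp [List.mem_flatMap, eq_comm]

theorem pvDedupFold_eq_update (r0 nuevo : List String) :
    nuevo.foldl (fun r e => if e ∈ r then r else r ++ [e]) r0 = PySem.Set.update r0 nuevo := by
  have : (fun (r : List String) e => if e ∈ r then r else r ++ [e])
      = fun r e => PySem.Set.add r e := by
    funext r e; rw [PySem.Set.add_eq_ite]
  rw [this]; rfl

theorem pvInv_step (l : List String) (a : List String × List String)
    (b : PySem.Set String × PySem.Set String) (h : pvInv a b) :
    pvInv (pvStepA l a) (pvStepB l b) := by
  obtain ⟨hra, hrb, hab, hres, hact⟩ := h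
  refine ⟨?_, ?_, ?_, ?_, ?_⟩
  · simp only [pvStepA, pvDedupFold_eq_update]
    exact PySem.Set.nodup_update _ _ hra
  · exact PySem.Set.nodup_union _ _ hrb
  · exact PySem.Set.nodup_ofList _
  · intro z
    simp only [pvStepA, pvDedupFold_eq_update, PySem.Set.mem_update,
      pvStepB, PySem.Set.mem_union, PySem.Set.mem_ofList, pvProd_mem]
    constructor
    · rintro (hz | ⟨x, hx, y, hy, rfl⟩)
      · exact Or.inl ((hres z).1 hz)
      · exact Or.inr ⟨x, (hact x).1 hx, y, hy, rfl⟩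
    · rintro (hz | ⟨x, hx, y, hy, rfl⟩)
      · exact Or.inl ((hres z).2 hz)
      · exact Or.inr ⟨x, (hact x).2 hx, y, hy, rfl⟩
  · intro z
    simp only [pvStepA, pvStepB, PySem.Set.mem_ofList, pvProd_mem]
    constructor
    · rintro ⟨x, hx, y, hy, rfl⟩; exact ⟨x, (hact x).1 hx, y, hy, rfl⟩
    · rintro ⟨x, hx, y, hy, rfl⟩; exact ⟨x, (hact x).2 hx, y, hy, rfl⟩

theorem pvInv_len (a : List String × List String) (b : PySem.Set String × PySem.Set String)
    (h : pvInv a b) : (a.1.length : Int) = PySem.Set.len b.1 := by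
  obtain ⟨hra, hrb, _, hres, _⟩ := h
  have : a.1.Perm b.1 := (List.perm_ext_iff_of_nodup hra hrb).2 hres
  simp [PySem.Set.len, this.length_eq]

theorem pvInv_init : pvInv (([""] : List String), ([""] : List String))
    (PySem.Set.ofList [""], PySem.Set.ofList [""]) := by
  refine ⟨by decide, ?_, ?_, ?_, ?_⟩ <;>
    simp [PySem.Set.nodup_ofList, PySem.Set.mem_ofList]

theorem pvKleene_eval (l : List String) :
    kleene_star l 1 = (pvStepA l ([""], [""])).1 ∧
    kleene_star l 2 = (pvStepA l (pvStepA l ([""], [""]))).1 ∧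
    kleene_star l 3 = (pvStepA l (pvStepA l (pvStepA l ([""], [""])))).1 ∧
    kleene_star l 4 = (pvStepA l (pvStepA l (pvStepA l (pvStepA l ([""], [""]))))).1 ∧
    kleene_star l 5 = (pvStepA l (pvStepA l (pvStepA l (pvStepA l (pvStepA l ([""], [""])))))).1 := by
  refine ⟨?_, ?_, ?_, ?_, ?_⟩ <;>
    simp [kleene_star, show PySem.List.pyRange 1 2 1 = [1] from by decide,
      show PySem.List.pyRange 1 3 1 = [1, 2] from by decide,
      show PySem.List.pyRange 1 4 1 = [1, 2, 3] from by decide,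
      show PySem.List.pyRange 1 5 1 = [1, 2, 3, 4] from by decide,
      show PySem.List.pyRange 1 6 1 = [1, 2, 3, 4, 5] from by decide]

-- ===== VERDICT (by name: the statement is the Claim_ definition above) =====
theorem analizar_crecimiento_spec : Claim_equal_analizar_crecimiento := by
  intro l _
  unfold Spec_analizar_crecimiento
  have hr : PySem.List.pyRange 1 6 1 = [1, 2, 3, 4, 5] := by decide
  obtain ⟨k1, k2, k3, k4, k5⟩ := pvKleene_eval l
  have i1 := pvInv_step l _ _ pvInv_init
  have i2 := pvInv_step l _ _ i1
  have i3 := pvInv_step l _ _ i2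
  have i4 := pvInv_step l _ _ i3
  have i5 := pvInv_step l _ _ i4
  have l1 := pvInv_len _ _ i1
  have l2 := pvInv_len _ _ i2
  have l3 := pvInv_len _ _ i3
  have l4 := pvInv_len _ _ i4
  have l5 := pvInv_len _ _ i5
  simp only [analizar_crecimiento, analizar_crecimiento_alt, hr, List.foldl,
    k1, k2, k3, k4, k5]
  simp [l1, l2, l3, l4, l5]
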